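-- pv_equiv track=rewrite | github.com/ANA-CNU/ANA-Daily-Algorithm | 신해솔/s5_2941.py | croatia
-- ===== SOURCE A (Python) =====
-- def croatia(word, count=0):
--     croatian_char = ["c=", "c-", "dz=", "d-",
--                      "lj", "nj", "s=", "z="]
--
--     if len(word) > 0:
--         count += 1
--         if word[0:2] in croatian_char:
--             return croatia(word[2:], count)
--         elif word[0:3] in croatian_char:
--             return croatia(word[3:], count)
--         else:
--             return croatia(word[1:], count)
--     else:
--         return count
-- ===== SOURCE B (Python) =====
-- def croatia(word, count=0):
--     TWO = {('c', '='), ('c', '-'), ('d', '-'), ('l', 'j'),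
--            ('n', 'j'), ('s', '='), ('z', '=')}
--     n = len(word)
--     i = 0
--     total = count
--     while i < n:
--         total += 1
--         if i + 1 < n and (word[i], word[i + 1]) in TWO:
--             i += 2
--         elif i + 2 < n and word[i] == 'd' and word[i + 1] == 'z' and word[i + 2] == '=':
--             i += 3
--         else:
--             i += 1
--     return total
-- ===== Notes on version B (the rewrite author's own statement) =====
-- stated objective: faster
-- what changed: replaced A's recursion that copies three slices of the word at every step with a single while-loop advancing an index and matching digraphs/trigraph by direct character comparison at the current offset
import Mathlib
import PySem

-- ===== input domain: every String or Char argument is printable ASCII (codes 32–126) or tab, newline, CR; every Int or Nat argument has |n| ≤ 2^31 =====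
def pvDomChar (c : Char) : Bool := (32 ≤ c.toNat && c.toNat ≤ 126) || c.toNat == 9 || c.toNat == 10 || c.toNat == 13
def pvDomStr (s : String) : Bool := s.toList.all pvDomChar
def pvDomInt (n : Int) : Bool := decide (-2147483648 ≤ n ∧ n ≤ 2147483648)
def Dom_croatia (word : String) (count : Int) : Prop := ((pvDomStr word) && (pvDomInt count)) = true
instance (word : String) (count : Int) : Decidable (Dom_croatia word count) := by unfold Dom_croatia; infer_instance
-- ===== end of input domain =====

-- B replaces A's O(n^2) recursive slicing by a single O(n) index scan that matches digraphs at the current offset.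

-- ===== PORT A =====
-- the croatian_char list of A, as lists of chars
def croDigraphs : List (List Char) :=
  [['c','='], ['c','-'], ['d','z','='], ['d','-'], ['l','j'], ['n','j'], ['s','='], ['z','=']]

lemma pvSliceFromLenLt {α : Type} (w : List α) (k : Int) (hk : 0 ≤ k) :
    (PySem.List.slice w (some k) none).length ≤ w.length - k.toNat := by
  simp [PySem.List.slice_from w hk]

def croatiaList (w : List Char) (count : Int) : Int :=
  if h : 0 < w.length then
    let count := count + 1
    if PySem.List.slice w (some 0) (some 2) ∈ croDigraphs then
      croatiaList (PySem.List.slice w (some 2) none) count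
    else if PySem.List.slice w (some 0) (some 3) ∈ croDigraphs then
      croatiaList (PySem.List.slice w (some 3) none) count
    else
      croatiaList (PySem.List.slice w (some 1) none) count
  else count
termination_by w.length
decreasing_by
  · exact Nat.lt_of_le_of_lt (pvSliceFromLenLt w 2 (by decide)) (Nat.sub_lt h (by decide))
  · exact Nat.lt_of_le_of_lt (pvSliceFromLenLt w 3 (by decide)) (Nat.sub_lt h (by decide))
  · exact Nat.lt_of_le_of_lt (pvSliceFromLenLt w 1 (by decide)) (Nat.sub_lt h (by decide))

def croatia (word : String) (count : Int) : Int := croatiaList word.toList count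

-- ===== PORT B =====
-- the TWO set of Source B
def croTwo : List (Char × Char) :=
  [('c','='), ('c','-'), ('d','-'), ('l','j'), ('n','j'), ('s','='), ('z','=')]

def croatiaLoop (w : List Char) (i : Nat) (total : Int) : Int :=
  if h : i < w.length then
    let total := total + 1
    if i + 1 < w.length ∧ (w.getD i ' ', w.getD (i+1) ' ') ∈ croTwo then
      croatiaLoop w (i+2) total
    else if i + 2 < w.length ∧ w.getD i ' ' = 'd' ∧ w.getD (i+1) ' ' = 'z' ∧ w.getD (i+2) ' ' = '=' then
      croatiaLoop w (i+3) total
    else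
      croatiaLoop w (i+1) total
  else total
termination_by w.length - i
decreasing_by
  · exact Nat.sub_lt_sub_left h (Nat.lt_add_of_pos_right (by decide))
  · exact Nat.sub_lt_sub_left h (Nat.lt_add_of_pos_right (by decide))
  · exact Nat.sub_lt_sub_left h (Nat.lt_add_of_pos_right (by decide))

def croatia_alt (word : String) (count : Int) : Int := croatiaLoop word.toList 0 count

-- ===== PRECONDITION & SPEC =====
def Spec_croatia (word : String) (count : Int) (out : Int) : Prop := out = croatia_alt word count
instance (word : String) (count : Int) (out : Int) : Decidable (Spec_croatia word count out) := by unfold Spec_croatia; infer_instance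

-- ===== CLAIM (what is proved, stated in full; the proofs are below) =====
def Claim_equal_croatia : Prop := ∀ (word : String) (count : Int), Dom_croatia word count → Spec_croatia word count (croatia word count)

-- ===== LEMMAS AND PROOFS =====

lemma mem2_croDigraphs (a b : Char) : ([a,b] ∈ croDigraphs) ↔ ((a,b) ∈ croTwo) := by
  simp [croDigraphs, croTwo]

lemma mem1_croDigraphs (a : Char) : [a] ∉ croDigraphs := by
  simp [croDigraphs]

lemma mem3_croDigraphs (a b c : Char) : ([a,b,c] ∈ croDigraphs) ↔ (a = 'd' ∧ b = 'z' ∧ c = '=') := by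
  simp [croDigraphs]

lemma croatiaLoop_eq_croatiaList (w : List Char) (i : Nat) (total : Int) :
    croatiaLoop w i total = croatiaList (w.drop i) total := by
  induction hn : w.length - i using Nat.strong_induction_on generalizing i total with
  | _ n ih =>
  subst hn
  rw [croatiaLoop, croatiaList]
  by_cases h : i < w.length
  · have hlen : 0 < (w.drop i).length := by simp; omega
    rw [dif_pos h, dif_pos hlen]
    have s2 : PySem.List.slice (w.drop i) (some 0) (some 2) = (w.drop i).take 2 := by
      rw [PySem.List.slice_zero_start, PySem.List.slice_to _ (by norm_num : (0:Int) ≤ 2)]; rfl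
    have s3 : PySem.List.slice (w.drop i) (some 0) (some 3) = (w.drop i).take 3 := by
      rw [PySem.List.slice_zero_start, PySem.List.slice_to _ (by norm_num : (0:Int) ≤ 3)]; rfl
    have sd : ∀ k : Nat, PySem.List.slice (w.drop i) (some (k : Int)) = w.drop (i + k) := by
      intro k
      rw [PySem.List.slice_from _ (by positivity)]
      simp [List.drop_drop]
    have c1 : w.drop i = w[i] :: w.drop (i + 1) := List.drop_eq_getElem_cons h
    have g0 : w.getD i ' ' = w[i] := List.getD_eq_getElem w ' ' h
    by_cases h1 : i + 1 < w.length
    · have c2 : w.drop (i + 1) = w[i+1] :: w.drop (i + 2) := List.drop_eq_getElem_cons h1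
      have g1 : w.getD (i+1) ' ' = w[i+1] := List.getD_eq_getElem w ' ' h1
      by_cases hb1 : (w[i], w[i+1]) ∈ croTwo
      · have ha1 : PySem.List.slice (w.drop i) (some 0) (some 2) ∈ croDigraphs := by
          rw [s2, c1, c2]; exact (mem2_croDigraphs _ _).mpr hb1
        rw [if_pos ha1, if_pos ⟨h1, by rw [g0, g1]; exact hb1⟩]
        have h2 : PySem.List.slice (w.drop i) (some 2) = w.drop (i + 2) := by
          exact_mod_cast sd 2
        rw [h2]
        exact ih (w.length - (i+2)) (by omega) (i+2) _ rfl
      · have ha1 : PySem.List.slice (w.drop i) (some 0) (some 2) ∉ croDigraphs := by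
          rw [s2, c1, c2]; exact fun hc => hb1 ((mem2_croDigraphs _ _).mp hc)
        rw [if_neg ha1, if_neg (by rw [g0, g1]; exact fun hc => hb1 hc.2)]
        by_cases h2 : i + 2 < w.length
        · have c3 : w.drop (i + 2) = w[i+2] :: w.drop (i + 3) := List.drop_eq_getElem_cons h2
          have g2 : w.getD (i+2) ' ' = w[i+2] := List.getD_eq_getElem w ' ' h2
          by_cases hb2 : w[i] = 'd' ∧ w[i+1] = 'z' ∧ w[i+2] = '='
          · have ha2 : PySem.List.slice (w.drop i) (some 0) (some 3) ∈ croDigraphs := by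
              rw [s3, c1, c2, c3]; exact (mem3_croDigraphs _ _ _).mpr hb2
            rw [if_pos ha2, if_pos ⟨h2, by rw [g0, g1, g2]; exact hb2⟩]
            have hs : PySem.List.slice (w.drop i) (some 3) = w.drop (i + 3) := by
              exact_mod_cast sd 3
            rw [hs]
            exact ih (w.length - (i+3)) (by omega) (i+3) _ rfl
          · have ha2 : PySem.List.slice (w.drop i) (some 0) (some 3) ∉ croDigraphs := by
              rw [s3, c1, c2, c3]; exact fun hc => hb2 ((mem3_croDigraphs _ _ _).mp hc)
            rw [if_neg ha2, if_neg (by rw [g0, g1, g2]; exact fun hc => hb2 hc.2)]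
            have hs : PySem.List.slice (w.drop i) (some 1) = w.drop (i + 1) := by
              exact_mod_cast sd 1
            rw [hs]
            exact ih (w.length - (i+1)) (by omega) (i+1) _ rfl
        · have c3 : w.drop (i + 2) = [] := List.drop_eq_nil_of_le (by omega)
          have ha2 : PySem.List.slice (w.drop i) (some 0) (some 3) ∉ croDigraphs := by
            rw [s3, c1, c2, c3]; exact fun hc => hb1 ((mem2_croDigraphs _ _).mp hc)
          rw [if_neg ha2, if_neg (fun hc => h2 hc.1)]
          have hs : PySem.List.slice (w.drop i) (some 1) = w.drop (i + 1) := by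
            exact_mod_cast sd 1
          rw [hs]
          exact ih (w.length - (i+1)) (by omega) (i+1) _ rfl
    · have c2 : w.drop (i + 1) = [] := List.drop_eq_nil_of_le (by omega)
      have ha1 : PySem.List.slice (w.drop i) (some 0) (some 2) ∉ croDigraphs := by
        rw [s2, c1, c2]; exact mem1_croDigraphs _
      have ha2 : PySem.List.slice (w.drop i) (some 0) (some 3) ∉ croDigraphs := by
        rw [s3, c1, c2]; exact mem1_croDigraphs _
      rw [if_neg ha1, if_neg ha2, if_neg (fun hc => h1 hc.1), if_neg (fun hc => h1 (by omega))]
      have hs : PySem.List.slice (w.drop i) (some 1) = w.drop (i + 1) := by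
        exact_mod_cast sd 1
      rw [hs]
      exact ih (w.length - (i+1)) (by omega) (i+1) _ rfl
  · have hd : w.drop i = [] := List.drop_eq_nil_of_le (by omega)
    simp [h, hd]

-- ===== VERDICT (by name: the statement is the Claim_ definition above) =====
theorem croatia_spec : Claim_equal_croatia := by
  intro word count _
  unfold Spec_croatia croatia croatia_alt
  rw [croatiaLoop_eq_croatiaList]
  simp
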